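-- pv_equiv track=rewrite | github.com/eurostat/multimno | multimno/core/quadkey_utils.py | get_children_quadkeys
-- ===== SOURCE A (Python) =====
-- from typing import List, Tuple
--
-- def get_children_quadkeys(quadkey: str, target_level: int) -> List[str]:
--     """
--     Generates all child quadkeys at a specified resolution level for a given quadkey.
--
--     This function takes a parent quadkey and a target level of detail, then returns
--     all child quadkeys that are contained within the parent quadkey's area at the
--     specified target level.
--
--     Args:
--         quadkey (str): The parent quadkey.
--         target_level (int): The target level of detail (zoom level) for the child quadkeys.
--
--     Returns:
--         List[str]: A list of all child quadkeys at the specified target level.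
--
--     Raises:
--         ValueError: If target_level is less than the level of the input quadkey.
--     """
--     # Get the level of the input quadkey
--     current_level = len(quadkey)
--
--     # Check that target_level is greater than or equal to current_level
--     if target_level < current_level:
--         raise ValueError(
--             f"Target level ({target_level}) must be greater than or equal to the current level ({current_level})"
--         )
--
--     # If target_level is the same as current_level, return the input quadkey
--     if target_level == current_level:
--         return [quadkey]
--
--     # Initialize the list of child quadkeys with the input quadkey
--     child_quadkeys = [quadkey]
--
--     # For each level between current_level and target_level
--     for _ in range(target_level - current_level):
--         # Initialize a new list to hold the next level of child quadkeys
--         next_level_quadkeys = []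
--
--         # For each quadkey in the current list
--         for qk in child_quadkeys:
--             # Generate the four children of this quadkey
--             next_level_quadkeys.extend([qk + "0", qk + "1", qk + "2", qk + "3"])
--
--         # Update the list of child quadkeys
--         child_quadkeys = next_level_quadkeys
--
--     return child_quadkeys
-- ===== SOURCE B (Python) =====
-- from typing import List, Tuple
--
--
-- def _suffixes(d):
--     # all digit strings of length d over "0123", first character varying slowest
--     if d == 0:
--         return [""]
--     rest = _suffixes(d - 1)
--     return [c + s for c in "0123" for s in rest]
--
--
-- def get_children_quadkeys(quadkey: str, target_level: int) -> List[str]: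
--     current_level = len(quadkey)
--     if target_level < current_level:
--         raise ValueError(
--             f"Target level ({target_level}) must be greater than or equal to the current level ({current_level})"
--         )
--     return [quadkey + s for s in _suffixes(target_level - current_level)]
-- ===== Notes on version B (the rewrite author's own statement) =====
-- stated objective: simpler
-- what changed: Replaces the level-by-level BFS rebuilding of the whole list (extend each partial quadkey on the right, one zoom level at a time) by a direct construction: recursively build all length-d digit suffixes by prefix extension and append each once to the parent quadkey.
import Mathlib
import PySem

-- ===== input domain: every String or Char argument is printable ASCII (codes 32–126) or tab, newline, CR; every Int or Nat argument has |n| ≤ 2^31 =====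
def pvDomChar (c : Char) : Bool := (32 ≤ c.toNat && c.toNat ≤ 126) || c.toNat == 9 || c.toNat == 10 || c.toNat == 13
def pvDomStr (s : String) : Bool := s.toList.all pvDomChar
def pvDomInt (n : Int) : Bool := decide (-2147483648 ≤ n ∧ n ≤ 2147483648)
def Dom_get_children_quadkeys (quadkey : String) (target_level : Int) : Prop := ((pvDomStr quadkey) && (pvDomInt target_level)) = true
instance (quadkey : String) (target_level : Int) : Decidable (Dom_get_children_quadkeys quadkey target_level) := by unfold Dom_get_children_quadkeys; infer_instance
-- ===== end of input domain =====

-- B replaces A's level-by-level BFS list rebuilding by a direct recursive construction of all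
-- length-d digit suffixes (prefix extension), each appended once to the parent quadkey; objective: simpler.

-- ===== PORT A =====
-- Python string concatenation s + "c" rendered on the List Char side (String.append is kernel-opaque)
def pvCat (s : String) (c : Char) : String := String.ofList (s.toList ++ [c])

def get_children_quadkeys (quadkey : String) (target_level : Int) : List String :=
  let current_level : Int := PySem.Str.len quadkey
  if target_level < current_level then []   -- Python raises ValueError here; excluded by Pre_
  else if target_level = current_level then [quadkey]
  else
    (PySem.List.pyRange 0 (target_level - current_level) 1).foldl
      (fun child_quadkeys _ =>
        child_quadkeys.flatMap (fun qk => [pvCat qk '0', pvCat qk '1', pvCat qk '2', pvCat qk '3']))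
      [quadkey]

-- ===== PORT B =====
-- _suffixes(d): Python strings rendered as List Char; "0123" loop = flatMap, c + s = c :: s
def pvSuffixes : Nat → List (List Char)
  | 0 => [[]]
  | d + 1 => ['0', '1', '2', '3'].flatMap (fun c => (pvSuffixes d).map (fun s => c :: s))

def get_children_quadkeys_alt (quadkey : String) (target_level : Int) : List String :=
  let current_level : Int := PySem.Str.len quadkey
  if target_level < current_level then []   -- B raises the same ValueError here; excluded by Pre_
  else (pvSuffixes (target_level - current_level).toNat).map
        (fun s => String.ofList (quadkey.toList ++ s))

-- ===== PRECONDITION & SPEC =====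
-- A (and B) raise ValueError exactly when target_level < len(quadkey); only those inputs are excluded.
def Pre_get_children_quadkeys (quadkey : String) (target_level : Int) : Prop :=
  PySem.Str.len quadkey ≤ target_level
instance (quadkey : String) (target_level : Int) : Decidable (Pre_get_children_quadkeys quadkey target_level) := by
  unfold Pre_get_children_quadkeys; infer_instance

def pvWitness_get_children_quadkeys : String × Int := ("013", 5)

def Spec_get_children_quadkeys (quadkey : String) (target_level : Int) (out : List String) : Prop := out = get_children_quadkeys_alt quadkey target_level
instance (quadkey : String) (target_level : Int) (out : List String) : Decidable (Spec_get_children_quadkeys quadkey target_level out) := by unfold Spec_get_children_quadkeys; infer_instance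

-- ===== CLAIM (what is proved, stated in full; the proofs are below) =====
def Claim_equal_get_children_quadkeys : Prop := ∀ (quadkey : String) (target_level : Int), Dom_get_children_quadkeys quadkey target_level → Pre_get_children_quadkeys quadkey target_level → Spec_get_children_quadkeys quadkey target_level (get_children_quadkeys quadkey target_level)

-- ===== LEMMAS AND PROOFS =====

-- A's one BFS step, on the suffix (List Char) side
def pvStepR (l : List (List Char)) : List (List Char) :=
  l.flatMap (fun s => [s ++ ['0'], s ++ ['1'], s ++ ['2'], s ++ ['3']])

-- a foldl that ignores the list elements is function iteration
theorem foldl_const_iterate {α β : Type} (f : α → α) (l : List β) (init : α) :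
    l.foldl (fun a _ => f a) init = f^[l.length] init := by
  induction l generalizing init with
  | nil => rfl
  | cons x xs ih => simp [List.foldl_cons, ih, Function.iterate_succ_apply]

theorem pvStepR_map_cons (c : Char) (l : List (List Char)) :
    pvStepR (l.map (fun s => c :: s)) = (pvStepR l).map (fun s => c :: s) := by
  induction l with
  | nil => rfl
  | cons s t ih => simp [pvStepR, List.flatMap_cons] at ih ⊢; simp [ih]

-- B's prefix-extension recursion satisfies A's suffix-extension recursion
theorem pvSuffixes_succ_right (d : Nat) : pvSuffixes (d + 1) = pvStepR (pvSuffixes d) := by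
  induction d with
  | zero => rfl
  | succ d ih =>
    show ['0','1','2','3'].flatMap (fun c => (pvSuffixes (d+1)).map (fun s => c :: s)) = _
    conv_rhs => rw [show pvSuffixes (d+1) = ['0','1','2','3'].flatMap (fun c => (pvSuffixes d).map (fun s => c :: s)) from rfl]
    rw [ih]
    simp only [← pvStepR_map_cons]
    simp only [pvStepR, List.flatMap_assoc]

theorem pvStepR_map_ofList_append (q : List Char) (l : List (List Char)) :
    (l.map (fun s => String.ofList (q ++ s))).flatMap
        (fun qk => [pvCat qk '0', pvCat qk '1', pvCat qk '2', pvCat qk '3'])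
      = (pvStepR l).map (fun s => String.ofList (q ++ s)) := by
  induction l with
  | nil => rfl
  | cons s t ih =>
    simp only [List.map_cons, List.flatMap_cons, pvStepR] at ih ⊢
    rw [ih]
    simp [pvCat, String.toList_ofList, List.append_assoc]

-- A's loop body applied d times to [quadkey] produces quadkey ++ each suffix of pvSuffixes d
theorem pvIterate_eq_map_suffixes (q : List Char) (d : Nat) :
    (fun child : List String =>
        child.flatMap (fun qk => [pvCat qk '0', pvCat qk '1', pvCat qk '2', pvCat qk '3']))^[d]
        [String.ofList q]
      = (pvSuffixes d).map (fun s => String.ofList (q ++ s)) := by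
  induction d with
  | zero => simp [pvSuffixes]
  | succ d ih =>
    rw [Function.iterate_succ_apply', ih, pvStepR_map_ofList_append, ← pvSuffixes_succ_right]

-- ===== VERDICT (by name: the statement is the Claim_ definition above) =====
theorem get_children_quadkeys_spec : Claim_equal_get_children_quadkeys := by
  intro quadkey target_level _ hpre
  have hpre' : PySem.Str.len quadkey ≤ target_level := hpre
  unfold Spec_get_children_quadkeys get_children_quadkeys get_children_quadkeys_alt
  rw [if_neg (show ¬ target_level < PySem.Str.len quadkey by omega),
      if_neg (show ¬ target_level < PySem.Str.len quadkey by omega)]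
  by_cases heq : target_level = PySem.Str.len quadkey
  · rw [if_pos heq]
    rw [show (target_level - PySem.Str.len quadkey).toNat = 0 by omega]
    simp [pvSuffixes, String.ofList_toList]
  · rw [if_neg heq]
    rw [foldl_const_iterate, PySem.List.length_pyRange_one]
    conv_lhs => rw [show quadkey = String.ofList quadkey.toList from String.ofList_toList.symm]
    rw [pvIterate_eq_map_suffixes quadkey.toList]
    simp
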